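-- pv_equiv track=rewrite | github.com/thomasbogue/markdown2html | markdownConverter.py | indentLevelOfLine
-- ===== SOURCE A (Python) =====
-- def indentLevelOfLine(line):
--   indent = 0
--   for c in line:
--     if c == ' ':
--       indent = indent + 1
--     elif c == '\t':
--       indent = indent + 5
--     else:
--       return(indent)
--   # if there is nothing but whitespace in the line, return 0
--   return(0)
-- ===== SOURCE B (Python) =====
-- def indentLevelOfLine(line):
--   stripped = line.lstrip(' \t')
--   if stripped == '':
--     return 0
--   prefix = line[:len(line) - len(stripped)]
--   return prefix.count(' ') + 5 * prefix.count('\t')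
-- ===== Notes on version B (the rewrite author's own statement) =====
-- stated objective: simpler
-- what changed: Replaces the single early-returning character scan with a strip-then-count decomposition: lstrip the space/tab prefix, return 0 for all-whitespace lines, otherwise count spaces and tabs in the prefix.
import Mathlib
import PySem

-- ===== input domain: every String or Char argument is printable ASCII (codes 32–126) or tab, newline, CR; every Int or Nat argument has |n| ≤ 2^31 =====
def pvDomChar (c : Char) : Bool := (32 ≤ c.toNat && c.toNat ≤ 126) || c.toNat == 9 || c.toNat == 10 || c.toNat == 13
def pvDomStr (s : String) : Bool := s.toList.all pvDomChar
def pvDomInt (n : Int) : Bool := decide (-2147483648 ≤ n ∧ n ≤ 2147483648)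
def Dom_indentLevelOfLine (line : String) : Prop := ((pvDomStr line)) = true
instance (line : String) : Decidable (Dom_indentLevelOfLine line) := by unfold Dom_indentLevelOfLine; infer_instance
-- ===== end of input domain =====

-- B replaces A's early-returning scan with a strip-then-count decomposition (objective: simpler).

-- ===== PORT A =====
-- A scans the characters, accumulating indent, returning at the first non-space/tab
-- character; if the whole line is whitespace it returns 0.
def indentGoA : List Char → Int → Int
  | [], _ => 0
  | c :: cs, indent =>
    if c = ' ' then indentGoA cs (indent + 1)
    else if c = '\t' then indentGoA cs (indent + 5)
    else indent

def indentLevelOfLine (line : String) : Int := indentGoA line.toList 0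

-- ===== PORT B =====
-- lstrip(' \t') → dropWhile, line[:len-len(stripped)] → take, str.count → List.count
def indentLevelOfLine_alt (line : String) : Int :=
  let l := line.toList
  let stripped := l.dropWhile (fun c => c = ' ' ∨ c = '\t')
  if stripped = [] then 0
  else
    let pre := l.take (l.length - stripped.length)
    (pre.count ' ' : Int) + 5 * (pre.count '\t' : Int)

-- ===== PRECONDITION & SPEC =====
def Spec_indentLevelOfLine (line : String) (out : Int) : Prop := out = indentLevelOfLine_alt line
instance (line : String) (out : Int) : Decidable (Spec_indentLevelOfLine line out) := by unfold Spec_indentLevelOfLine; infer_instance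

-- ===== CLAIM (what is proved, stated in full; the proofs are below) =====
def Claim_equal_indentLevelOfLine : Prop := ∀ (line : String), Dom_indentLevelOfLine line → Spec_indentLevelOfLine line (indentLevelOfLine line)

-- ===== LEMMAS AND PROOFS =====

-- Characterisation of A's scan in terms of takeWhile/dropWhile.
theorem indentGoA_char (l : List Char) : ∀ (i : Int),
    indentGoA l i =
      if l.dropWhile (fun c => decide (c = ' ' ∨ c = '\t')) = [] then 0
      else i + ((l.takeWhile (fun c => decide (c = ' ' ∨ c = '\t'))).count ' ' : Int)
             + 5 * ((l.takeWhile (fun c => decide (c = ' ' ∨ c = '\t'))).count '\t' : Int) := by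
  induction l with
  | nil => intro i; simp [indentGoA]
  | cons c cs ih =>
    intro i
    by_cases hs : c = ' '
    · subst hs
      rw [show indentGoA (' ' :: cs) i = indentGoA cs (i + 1) from rfl,
          List.dropWhile_cons_of_pos (by decide), List.takeWhile_cons_of_pos (by decide), ih]
      split_ifs with h
      · rfl
      · simp only [List.count_cons]
        have h1 : (' ' == ' ') = true := by decide
        have h2 : (' ' == '\t') = true ↔ False := by decide
        simp
        ring
    · by_cases ht : c = '\t'
      · subst ht
        rw [show indentGoA ('\t' :: cs) i = indentGoA cs (i + 5) from rfl,
            List.dropWhile_cons_of_pos (by decide), List.takeWhile_cons_of_pos (by decide), ih]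
        split_ifs with h
        · rfl
        · simp only [List.count_cons]
          have h1 : ('\t' == ' ') = true ↔ False := by decide
          have h2 : ('\t' == '\t') = true := by decide
          simp
          ring
      · rw [show indentGoA (c :: cs) i = if c = ' ' then indentGoA cs (i + 1)
              else if c = '\t' then indentGoA cs (i + 5) else i from rfl]
        simp [hs, ht]

theorem take_eq_takeWhile (l : List Char) (p : Char → Bool) :
    l.take (l.length - (l.dropWhile p).length) = l.takeWhile p := by
  have hsplit : l.takeWhile p ++ l.dropWhile p = l := List.takeWhile_append_dropWhile
  have hlen : (l.takeWhile p).length + (l.dropWhile p).length = l.length := by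
    rw [← List.length_append, hsplit]
  have hsub : l.length - (l.dropWhile p).length = (l.takeWhile p).length := by omega
  have htake := List.take_left (l₁ := l.takeWhile p) (l₂ := l.dropWhile p)
  rw [hsplit] at htake
  rw [hsub]
  exact htake

-- ===== VERDICT (by name: the statement is the Claim_ definition above) =====
theorem indentLevelOfLine_spec : Claim_equal_indentLevelOfLine := by
  intro line _
  unfold Spec_indentLevelOfLine indentLevelOfLine indentLevelOfLine_alt
  simp only []
  rw [indentGoA_char, take_eq_takeWhile]
  split_ifs with h
  · rfl
  · simp
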